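-- pv_equiv track=rewrite | github.com/mosadd1X/novelforge-ai | src/core/novel_generator.py | _extract_characters_from_text
-- ===== SOURCE A (Python) =====
-- from typing import Dict, List, Any, Tuple
--
-- def _extract_characters_from_text(response_text: str) -> List[Dict[str, Any]]:
--     """Extract character information from text response."""
--     characters = []
--     current_char = {}
--
--     # Simple parsing logic for text format
--     lines = response_text.split('\n')
--     for line in lines:
--         line = line.strip()
--         if not line:
--             continue
--
--         # Look for character headers (e.g., "Character 1:" or "John Doe:")
--         if ':' in line and len(line.split(':')) == 2 and len(line) < 50:
--             # Save previous character if exists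
--             if current_char and 'name' in current_char:
--                 characters.append(current_char)
--
--             # Start new character
--             name = line.split(':', 1)[0].strip()
--             current_char = {'name': name}
--
--         # Look for character attributes
--         elif ':' in line and current_char and len(line.split(':', 1)) == 2:
--             key, value = line.split(':', 1)
--             key = key.strip().lower().replace(' ', '_')
--             current_char[key] = value.strip()
--
--     # Add the last character
--     if current_char and 'name' in current_char:
--         characters.append(current_char)
--
--     return characters if characters else []
-- ===== SOURCE B (Python) =====
-- from typing import Dict, List, Any
--
-- def _is_header(line: str) -> bool:
--     return ':' in line and len(line.split(':')) == 2 and len(line) < 50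
--
-- def _extract_characters_from_text(response_text: str) -> List[Dict[str, Any]]:
--     """Extract character information from text response (recursive-descent parse)."""
--     lines = [s for s in (ln.strip() for ln in response_text.split('\n')) if s]
--
--     def parse(ls):
--         if not ls:
--             return []
--         head, rest = ls[0], ls[1:]
--         if not _is_header(head):
--             return parse(rest)  # ignore lines before the first header
--         j = next((i for i, l in enumerate(rest) if _is_header(l)), len(rest))
--         record = {'name': head.split(':', 1)[0].strip()}
--         for l in rest[:j]:
--             if ':' in l:
--                 k, v = l.split(':', 1)
--                 record[k.strip().lower().replace(' ', '_')] = v.strip()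
--         return [record] + parse(rest[j:])
--
--     return parse(lines)
-- ===== Notes on version B (the rewrite author's own statement) =====
-- stated objective: alternative
-- what changed: A is a single fold over all lines carrying mutable (characters, current_char) state flushed at headers and at the end; B is a recursive-descent parser that skips pre-header lines, then for each header block slices the attribute lines up to the next header and builds that record independently.
import Mathlib
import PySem

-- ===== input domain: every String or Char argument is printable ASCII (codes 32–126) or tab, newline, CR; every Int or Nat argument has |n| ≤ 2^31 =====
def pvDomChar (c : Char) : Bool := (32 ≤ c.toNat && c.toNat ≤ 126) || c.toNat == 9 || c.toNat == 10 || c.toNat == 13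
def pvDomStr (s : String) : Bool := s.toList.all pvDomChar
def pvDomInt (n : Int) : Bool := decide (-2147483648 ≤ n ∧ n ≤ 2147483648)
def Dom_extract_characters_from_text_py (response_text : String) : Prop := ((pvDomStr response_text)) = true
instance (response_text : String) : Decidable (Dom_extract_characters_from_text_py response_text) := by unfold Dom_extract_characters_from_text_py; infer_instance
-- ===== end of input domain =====

-- B re-parses the text by recursive descent over header blocks instead of A's single fold with carried
-- mutable state; same return value everywhere (objective: alternative decomposition, no speed claim).

abbrev pvD := PySem.Dict (List Char) (List Char)

def pvNameKey : List Char := ['n', 'a', 'm', 'e']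

-- ===== PORT A =====
-- loop body of A's `for line in lines` (state = (characters, current_char))
def pvStepA (st : List pvD × pvD) (rawline : List Char) : List pvD × pvD :=
  let line := PySem.Chars.strip rawline
  if line = [] then st
  else if PySem.Chars.isIn [':'] line && (PySem.Chars.splitOn line [':']).length == 2
      && decide (line.length < 50) then
    let chars := if !st.2.items.isEmpty && st.2.contains pvNameKey then st.1 ++ [st.2] else st.1
    -- line.split(':', 1)[0]: split never returns an empty list, so [0] (no IndexError) is headD
    let name := PySem.Chars.strip ((PySem.Chars.splitOnMax line [':'] 1).headD [])
    (chars, PySem.Dict.empty.insert pvNameKey name)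
  else if PySem.Chars.isIn [':'] line && !st.2.items.isEmpty
      && (PySem.Chars.splitOnMax line [':'] 1).length == 2 then
    -- `key, value = line.split(':', 1)`: the guard just checked the length is 2
    match PySem.Chars.splitOnMax line [':'] 1 with
    | [k, v] =>
        (st.1, st.2.insert (PySem.Chars.replace (PySem.Chars.lower (PySem.Chars.strip k)) [' '] ['_'])
          (PySem.Chars.strip v))
    | _ => st
  else st

def extract_characters_from_text_py (response_text : String) : List (List (String × String)) :=
  let lines := PySem.Chars.splitOn response_text.toList ['\n']
  let st := lines.foldl pvStepA ([], PySem.Dict.empty)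
  let chars := if !st.2.items.isEmpty && st.2.contains pvNameKey then st.1 ++ [st.2] else st.1
  (if chars.isEmpty then [] else chars).map (fun d => d.items.map (fun p => (String.ofList p.1, String.ofList p.2)))

-- ===== PORT B =====
def pvIsHeader (line : List Char) : Bool :=
  PySem.Chars.isIn [':'] line && (PySem.Chars.splitOn line [':']).length == 2
    && decide (line.length < 50)

-- body of B's attribute `for` loop
def pvAttrStep (d : pvD) (l : List Char) : pvD :=
  if PySem.Chars.isIn [':'] l then
    match PySem.Chars.splitOnMax l [':'] 1 with
    | [k, v] =>
        d.insert (PySem.Chars.replace (PySem.Chars.lower (PySem.Chars.strip k)) [' '] ['_'])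
          (PySem.Chars.strip v)
    | _ => d
  else d

-- B's recursive `parse`: `rest[:j]` / `rest[j:]` at the first header index j = takeWhile / dropWhile
def pvParse : List (List Char) → List pvD
  | [] => []
  | head :: rest =>
    if pvIsHeader head then
      let record := (rest.takeWhile (fun l => !pvIsHeader l)).foldl pvAttrStep
        (PySem.Dict.empty.insert pvNameKey
          (PySem.Chars.strip ((PySem.Chars.splitOnMax head [':'] 1).headD [])))
      record :: pvParse (rest.dropWhile (fun l => !pvIsHeader l))
    else pvParse rest
  termination_by ls => ls.length
  decreasing_by
  · exact Nat.lt_succ_of_le (List.length_dropWhile_le _ _)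
  · simp

def extract_characters_from_text_py_alt (response_text : String) : List (List (String × String)) :=
  let lines := ((PySem.Chars.splitOn response_text.toList ['\n']).map PySem.Chars.strip).filter
    (fun l => !l.isEmpty)
  (pvParse lines).map (fun d => d.items.map (fun p => (String.ofList p.1, String.ofList p.2)))

-- ===== PRECONDITION & SPEC =====
def Spec_extract_characters_from_text_py (response_text : String) (out : List (List (String × String))) : Prop := out = extract_characters_from_text_py_alt response_text
instance (response_text : String) (out : List (List (String × String))) : Decidable (Spec_extract_characters_from_text_py response_text out) := by unfold Spec_extract_characters_from_text_py; infer_instance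

-- ===== CLAIM (what is proved, stated in full; the proofs are below) =====
def Claim_equal_extract_characters_from_text_py : Prop := ∀ (response_text : String), Dom_extract_characters_from_text_py response_text → Spec_extract_characters_from_text_py response_text (extract_characters_from_text_py response_text)

-- ===== LEMMAS AND PROOFS =====

-- A's loop body with the `line.strip()` already performed
def pvStepS (st : List pvD × pvD) (line : List Char) : List pvD × pvD :=
  if line = [] then st
  else if PySem.Chars.isIn [':'] line && (PySem.Chars.splitOn line [':']).length == 2
      && decide (line.length < 50) then
    let chars := if !st.2.items.isEmpty && st.2.contains pvNameKey then st.1 ++ [st.2] else st.1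
    let name := PySem.Chars.strip ((PySem.Chars.splitOnMax line [':'] 1).headD [])
    (chars, PySem.Dict.empty.insert pvNameKey name)
  else if PySem.Chars.isIn [':'] line && !st.2.items.isEmpty
      && (PySem.Chars.splitOnMax line [':'] 1).length == 2 then
    match PySem.Chars.splitOnMax line [':'] 1 with
    | [k, v] =>
        (st.1, st.2.insert (PySem.Chars.replace (PySem.Chars.lower (PySem.Chars.strip k)) [' '] ['_'])
          (PySem.Chars.strip v))
    | _ => st
  else st

theorem pvStepA_eq : pvStepA = fun st raw => pvStepS st (PySem.Chars.strip raw) := rfl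

-- the "save current character" test of A
def pvPred (d : pvD) : Bool := !d.items.isEmpty && d.contains pvNameKey

def pvFinish (st : List pvD × pvD) : List pvD :=
  if pvPred st.2 then st.1 ++ [st.2] else st.1

-- the fresh record A/B start at a header line
def pvNewRec (l : List Char) : pvD :=
  PySem.Dict.empty.insert pvNameKey (PySem.Chars.strip ((PySem.Chars.splitOnMax l [':'] 1).headD []))

theorem pvStepS_nil (st : List pvD × pvD) : pvStepS st [] = st := rfl

theorem pvAttrStep_nil (d : pvD) : pvAttrStep d [] = d := rfl

theorem pvIsHeader_nil : pvIsHeader [] = false := by decide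

theorem pvPred_insert (d : pvD) (k v : List Char) (h : pvPred d = true) :
    pvPred (d.insert k v) = true := by
  have h2 : (d.insert k v).contains pvNameKey = true := by
    rw [PySem.Dict.contains_insert]
    simp only [pvPred, Bool.and_eq_true] at h
    simp [h.2]
  have h1 : ((d.insert k v).items.isEmpty) = false := by
    rw [PySem.Dict.items_insert]
    split
    · rename_i hc
      cases hd : d.items with
      | nil => simp [PySem.Dict.contains, hd] at hc
      | cons a t => simp
    · simp
  simp [pvPred, h1, h2]

theorem pvPred_attrStep (d : pvD) (l : List Char) (h : pvPred d = true) :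
    pvPred (pvAttrStep d l) = true := by
  unfold pvAttrStep
  split
  · split
    · exact pvPred_insert _ _ _ h
    · exact h
  · exact h

theorem pvPred_newRec (l : List Char) : pvPred (pvNewRec l) = true := by
  simp [pvNewRec, pvPred, PySem.Dict.insert, PySem.Dict.contains, PySem.Dict.empty]

theorem pvStepS_header (st : List pvD × pvD) (l : List Char) (hl : pvIsHeader l = true) :
    pvStepS st l = ((if pvPred st.2 then st.1 ++ [st.2] else st.1), pvNewRec l) := by
  have hne : l ≠ [] := by rintro rfl; rw [pvIsHeader_nil] at hl; cases hl
  simp only [pvIsHeader] at hl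
  simp only [pvStepS, pvPred, pvNewRec, if_neg hne, hl, if_pos]
  rfl

theorem pvStepS_attr (st : List pvD × pvD) (l : List Char) (hne : l ≠ [])
    (hl : pvIsHeader l = false) (hp : pvPred st.2 = true) :
    pvStepS st l = (st.1, pvAttrStep st.2 l) := by
  have hcur : (!st.2.items.isEmpty) = true := by
    simp only [pvPred, Bool.and_eq_true] at hp; exact hp.1
  simp only [pvIsHeader] at hl
  simp only [pvStepS, pvAttrStep, if_neg hne, hl, if_neg, Bool.false_eq_true, not_false_iff]
  by_cases hin : PySem.Chars.isIn [':'] l = true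
  · match hm : PySem.Chars.splitOnMax l [':'] 1 with
    | [k, v] => simp [hin, hcur]
    | [] => simp [hin, hcur]
    | [a] => simp [hin, hcur]
    | a :: b :: c :: t => simp [hin, hcur]
  · simp only [Bool.not_eq_true] at hin
    simp [hin]

theorem pvStepS_emptycur (chars : List pvD) (l : List Char) (hl : pvIsHeader l = false) :
    pvStepS (chars, PySem.Dict.empty) l = (chars, PySem.Dict.empty) := by
  by_cases hne : l = []
  · subst hne; rfl
  · simp only [pvIsHeader] at hl
    simp [pvStepS, hl, PySem.Dict.empty]

theorem pvParse_cons_header (l : List Char) (ls : List (List Char)) (hl : pvIsHeader l = true) :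
    pvParse (l :: ls) =
      ((ls.takeWhile (fun x => !pvIsHeader x)).foldl pvAttrStep (pvNewRec l))
        :: pvParse (ls.dropWhile (fun x => !pvIsHeader x)) := by
  rw [pvParse]
  simp [hl, pvNewRec]

theorem pvParse_cons_not (l : List Char) (ls : List (List Char)) (hl : pvIsHeader l = false) :
    pvParse (l :: ls) = pvParse ls := by
  rw [pvParse]
  simp [hl]

theorem pvFoldS_filter (ls : List (List Char)) (st : List pvD × pvD) :
    (ls.filter (fun l => !l.isEmpty)).foldl pvStepS st = ls.foldl pvStepS st := by
  rw [List.foldl_filter]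
  have : (fun (x : List pvD × pvD) (y : List Char) => if (!y.isEmpty) = true then pvStepS x y else x)
      = pvStepS := by
    funext x y
    cases y with
    | nil => simp [pvStepS_nil]
    | cons a t => simp
  rw [this]

theorem pvMain2 (ls : List (List Char)) (chars : List pvD) (cur : pvD) (h : pvPred cur = true) :
    pvFinish (ls.foldl pvStepS (chars, cur)) =
      chars ++ [(ls.takeWhile (fun l => !pvIsHeader l)).foldl pvAttrStep cur]
        ++ pvParse (ls.dropWhile (fun l => !pvIsHeader l)) := by
  induction ls generalizing chars cur with
  | nil => simp [pvFinish, h, pvParse]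
  | cons l ls ih =>
    by_cases hH : pvIsHeader l = true
    · rw [List.foldl_cons, pvStepS_header _ _ hH, if_pos h,
        ih _ _ (pvPred_newRec l)]
      rw [List.takeWhile_cons_of_neg (by simp [hH]), List.dropWhile_cons_of_neg (by simp [hH]),
        pvParse_cons_header _ _ hH]
      simp
    · rw [Bool.not_eq_true] at hH
      by_cases hne : l = []
      · subst hne
        rw [List.foldl_cons, pvStepS_nil, ih _ _ h]
        simp [List.takeWhile_cons_of_pos, List.dropWhile_cons_of_pos, pvIsHeader_nil,
          pvAttrStep_nil]
      · rw [List.foldl_cons, pvStepS_attr _ _ hne hH h, ih _ _ (pvPred_attrStep _ _ h)]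
        rw [List.takeWhile_cons_of_pos (by simp [hH]), List.dropWhile_cons_of_pos (by simp [hH])]
        simp

theorem pvMain1 (ls : List (List Char)) (chars : List pvD) :
    pvFinish (ls.foldl pvStepS (chars, PySem.Dict.empty)) = chars ++ pvParse ls := by
  induction ls generalizing chars with
  | nil => simp [pvFinish, pvPred, PySem.Dict.empty, pvParse]
  | cons l ls ih =>
    by_cases hH : pvIsHeader l = true
    · rw [List.foldl_cons, pvStepS_header _ _ hH]
      have hpe : pvPred (PySem.Dict.empty : pvD) = false := by
        simp [pvPred, PySem.Dict.empty]
      rw [if_neg (by simp [hpe]), pvMain2 _ _ _ (pvPred_newRec l), pvParse_cons_header _ _ hH]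
      simp
    · rw [Bool.not_eq_true] at hH
      rw [List.foldl_cons, pvStepS_emptycur _ _ hH, ih, pvParse_cons_not _ _ hH]

theorem pvIfEmpty (xs : List pvD) : (if xs.isEmpty then ([] : List pvD) else xs) = xs := by
  cases xs <;> simp

-- ===== VERDICT (by name: the statement is the Claim_ definition above) =====
theorem extract_characters_from_text_py_spec : Claim_equal_extract_characters_from_text_py := by
  intro s _
  unfold Spec_extract_characters_from_text_py
  simp only [extract_characters_from_text_py, extract_characters_from_text_py_alt, pvStepA_eq]
  rw [← List.foldl_map, ← pvFoldS_filter]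
  have key : ∀ L : List (List Char),
      (if (pvFinish (L.foldl pvStepS ([], PySem.Dict.empty))).isEmpty then ([] : List pvD)
        else pvFinish (L.foldl pvStepS ([], PySem.Dict.empty))) = pvParse L := by
    intro L
    rw [pvIfEmpty, pvMain1]
    simp
  exact congrArg (List.map _) (key _)
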